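-- pv_equiv track=rewrite | github.com/yurad12/coding-test | Python/BOOK/anything.py | solution
-- ===== SOURCE A (Python) =====
-- def solution(arr):
--     n = len(arr)
--     arr.sort()
--     rearranged_arr = sorted(arr)
--     count = 0
--     start, end = 0, 0
--
--     while start < n and end < n:
--         if arr[start] < rearranged_arr[end]:
--             count += 1
--             start += 1
--             end += 1
--         else:
--             end += 1
--
--     return count
-- ===== SOURCE B (Python) =====
-- def solution(arr):
--     arr.sort()  # keep A's in-place sort so mutation is identical
--     run = 0
--     max_run = 0
--     prev = None
--     for x in arr:
--         if prev is not None and x == prev: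
--             run += 1
--         else:
--             run = 1
--         if run > max_run:
--             max_run = run
--         prev = x
--     return len(arr) - max_run
-- ===== Notes on version B (the rewrite author's own statement) =====
-- stated objective: simpler
-- what changed: Replaces A's two-pointer scan over two sorted copies by a single run-length pass over the sorted array that tracks the longest run of equal elements (the mode's frequency) and returns n minus it.
import Mathlib
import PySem

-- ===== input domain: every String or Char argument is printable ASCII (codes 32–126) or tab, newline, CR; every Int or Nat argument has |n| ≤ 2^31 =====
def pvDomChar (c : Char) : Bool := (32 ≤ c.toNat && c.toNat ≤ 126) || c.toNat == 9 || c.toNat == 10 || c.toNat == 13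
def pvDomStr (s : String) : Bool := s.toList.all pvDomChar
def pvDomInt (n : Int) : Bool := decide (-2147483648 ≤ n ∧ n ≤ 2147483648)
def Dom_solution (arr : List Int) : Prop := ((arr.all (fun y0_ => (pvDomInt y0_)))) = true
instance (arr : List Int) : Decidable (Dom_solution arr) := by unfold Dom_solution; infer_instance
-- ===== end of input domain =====

-- B replaces A's two-pointer scan over two sorted copies by one run-length pass over the
-- sorted array (n minus the longest run of equal elements); both sort the argument in place,
-- so the observable mutation is the same and the claim is about the return value.

-- ===== PORT A =====
-- the while loop of A: both indices are in range whenever read (start ≤ e < n),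
-- so List.getD is exact for arr[start] / rearranged_arr[end]
def solution_loop (s r : List Int) (n start e : Nat) (count : Int) : Int :=
  if _h : start < n ∧ e < n then
    if s.getD start 0 < r.getD e 0 then
      solution_loop s r n (start + 1) (e + 1) (count + 1)
    else
      solution_loop s r n start (e + 1) count
  else count
termination_by n - e
decreasing_by all_goals omega

def solution (arr : List Int) : Int :=
  let n := arr.length
  let arrS := PySem.List.sorted arr (fun x => x)          -- arr.sort()
  let rearranged := PySem.List.sorted arrS (fun x => x)   -- sorted(arr)
  solution_loop arrS rearranged n 0 0 0

-- ===== PORT B =====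
def solution_alt (arr : List Int) : Int :=
  let s := PySem.List.sorted arr (fun x => x)             -- arr.sort()
  let st := s.foldl (fun (acc : Option Int × Nat × Nat) x =>
      let run := if acc.1 = some x then acc.2.1 + 1 else 1
      (some x, run, max acc.2.2 run)) (none, 0, 0)
  (arr.length : Int) - (st.2.2 : Int)

-- ===== PRECONDITION & SPEC =====
def Spec_solution (arr : List Int) (out : Int) : Prop := out = solution_alt arr
instance (arr : List Int) (out : Int) : Decidable (Spec_solution arr out) := by unfold Spec_solution; infer_instance

-- ===== CLAIM (what is proved, stated in full; the proofs are below) =====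
def Claim_equal_solution : Prop := ∀ (arr : List Int), Dom_solution arr → Spec_solution arr (solution arr)

-- ===== LEMMAS AND PROOFS =====

-- length of the run of equal elements ending at index e of s
def runLen (s : List Int) : Nat → Nat
  | 0 => 1
  | e + 1 => if s.getD (e + 1) 0 = s.getD e 0 then runLen s e + 1 else 1

-- longest run among the first e elements of s
def maxRun (s : List Int) : Nat → Nat
  | 0 => 0
  | e + 1 => max (maxRun s e) (runLen s e)

theorem runLen_zero (s : List Int) : runLen s 0 = 1 := rfl

theorem runLen_succ (s : List Int) (e : Nat) :
    runLen s (e + 1) = if s.getD (e + 1) 0 = s.getD e 0 then runLen s e + 1 else 1 := rfl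

theorem maxRun_zero (s : List Int) : maxRun s 0 = 0 := rfl

theorem maxRun_succ (s : List Int) (e : Nat) :
    maxRun s (e + 1) = max (maxRun s e) (runLen s e) := rfl

theorem runLen_le (s : List Int) (e : Nat) : runLen s e ≤ e + 1 := by
  induction e with
  | zero => rw [runLen_zero]
  | succ e ih => rw [runLen_succ]; split <;> omega

theorem maxRun_le (s : List Int) (e : Nat) : maxRun s e ≤ e := by
  induction e with
  | zero => rw [maxRun_zero]
  | succ e ih => rw [maxRun_succ]; have := runLen_le s e; omega

theorem runLen_le_maxRun_succ (s : List Int) (e : Nat) : runLen s e ≤ maxRun s e + 1 := by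
  induction e with
  | zero => rw [runLen_zero, maxRun_zero]
  | succ e ih => rw [runLen_succ, maxRun_succ]; split <;> omega

-- all elements of the run ending at e are equal to s[e]
theorem run_eq (s : List Int) (e : Nat) :
    ∀ j, e + 1 - runLen s e ≤ j → j ≤ e → s.getD j 0 = s.getD e 0 := by
  induction e with
  | zero => intro j _ h2; interval_cases j; rfl
  | succ e ih =>
    intro j h1 h2
    by_cases hj : j = e + 1
    · subst hj; rfl
    · rw [runLen_succ] at h1
      split at h1
      · next heq =>
        rw [heq]
        have hr := runLen_le s e
        exact ih j (by omega) (by omega)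
      · omega

-- the element just before the run ending at e is strictly smaller (needs sortedness)
theorem run_lt (s : List Int) (e : Nat)
    (hs : ∀ p q : Nat, p ≤ q → q < s.length → s.getD p 0 ≤ s.getD q 0) :
    e < s.length → runLen s e ≤ e → s.getD (e - runLen s e) 0 < s.getD e 0 := by
  induction e with
  | zero => intro _ h; rw [runLen_zero] at h; omega
  | succ e ih =>
    intro hn h
    rw [runLen_succ] at h ⊢
    split
    · next heq =>
      rw [heq]
      have h' : runLen s e ≤ e := by split at h <;> omega
      have : e + 1 - (runLen s e + 1) = e - runLen s e := by omega
      rw [this]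
      exact ih (by omega) h'
    · next hne =>
      have hle : s.getD e 0 ≤ s.getD (e + 1) 0 := hs e (e + 1) (by omega) hn
      have h1 : e + 1 - 1 = e := by omega
      rw [h1]
      exact lt_of_le_of_ne hle (fun h' => hne h'.symm)

-- the comparison A's loop makes equals "the current run is not longer than the best run"
theorem cmp_iff (s : List Int) (e : Nat)
    (hs : ∀ p q : Nat, p ≤ q → q < s.length → s.getD p 0 ≤ s.getD q 0)
    (hn : e < s.length) :
    (s.getD (e - maxRun s e) 0 < s.getD e 0) ↔ runLen s e ≤ maxRun s e := by
  have hrl : runLen s e ≤ e + 1 := runLen_le s e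
  have hme : maxRun s e ≤ e := maxRun_le s e
  constructor
  · intro hlt
    by_contra hgt
    push_neg at hgt
    have h1 : e + 1 - runLen s e ≤ e - maxRun s e := by omega
    have := run_eq s e (e - maxRun s e) h1 (by omega)
    omega
  · intro hle
    have hlt := run_lt s e hs hn (by omega)
    have hmono : s.getD (e - maxRun s e) 0 ≤ s.getD (e - runLen s e) 0 :=
      hs _ _ (by omega) (by omega)
    omega

theorem maxRun_succ_le (s : List Int) (e : Nat) : maxRun s (e + 1) ≤ maxRun s e + 1 := by
  have := runLen_le_maxRun_succ s e
  rw [maxRun_succ]; omega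

-- e - maxRun s e is monotone
theorem d_mono (s : List Int) (a b : Nat) (h : a ≤ b) :
    a - maxRun s a ≤ b - maxRun s b := by
  induction b with
  | zero => omega
  | succ b ih =>
    by_cases hab : a = b + 1
    · subst hab; exact Nat.le_refl _
    · have h1 := ih (by omega)
      have h2 := maxRun_succ_le s b
      have h3 := maxRun_le s b
      omega

-- A's loop, started at end = e with start = e - maxRun(prefix e), adds the remaining count
theorem loopA_eval (s : List Int)
    (hs : ∀ p q : Nat, p ≤ q → q < s.length → s.getD p 0 ≤ s.getD q 0) :
    ∀ k e (count : Int), e ≤ s.length → s.length - e = k →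
      solution_loop s s s.length (e - maxRun s e) e count =
        count + ((s.length - maxRun s s.length) - (e - maxRun s e) : Nat) := by
  intro k
  induction k with
  | zero =>
    intro e count he hk
    have : e = s.length := by omega
    subst this
    unfold solution_loop
    simp
  | succ k ih =>
    intro e count he hk
    have hen : e < s.length := by omega
    have hstart : e - maxRun s e < s.length := by omega
    unfold solution_loop
    rw [dif_pos ⟨hstart, hen⟩]
    have hme : maxRun s e ≤ e := maxRun_le s e
    have hr1 := runLen_le_maxRun_succ s e
    by_cases hc : s.getD (e - maxRun s e) 0 < s.getD e 0
    · rw [if_pos hc]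
      have hrle : runLen s e ≤ maxRun s e := (cmp_iff s e hs hen).mp hc
      have hmeq : maxRun s (e + 1) = maxRun s e := by rw [maxRun_succ]; omega
      have hstep : e - maxRun s e + 1 = (e + 1) - maxRun s (e + 1) := by omega
      rw [hstep, ih (e + 1) (count + 1) (by omega) (by omega)]
      have hd := d_mono s (e + 1) s.length (by omega)
      rw [← hstep] at hd ⊢
      omega
    · rw [if_neg hc]
      have hrle : ¬ runLen s e ≤ maxRun s e := fun h => hc ((cmp_iff s e hs hen).mpr h)
      have hmeq : maxRun s (e + 1) = maxRun s e + 1 := by rw [maxRun_succ]; omega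
      have hstep : e - maxRun s e = (e + 1) - maxRun s (e + 1) := by omega
      rw [hstep, ih (e + 1) count (by omega) (by omega), ← hstep]

-- the state of B's fold after the first e elements
def stB (s : List Int) : Nat → Option Int × Nat × Nat
  | 0 => (none, 0, 0)
  | e + 1 => (some (s.getD e 0), runLen s e, maxRun s (e + 1))

theorem foldB_eval (s : List Int) :
    ∀ e, e ≤ s.length →
      (s.take e).foldl (fun (acc : Option Int × Nat × Nat) x =>
        let run := if acc.1 = some x then acc.2.1 + 1 else 1
        (some x, run, max acc.2.2 run)) (none, 0, 0) = stB s e := by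
  intro e
  induction e with
  | zero => intro _; simp [stB]
  | succ e ih =>
    intro he
    have hlt : e < s.length := by omega
    have htake : s.take (e + 1) = s.take e ++ [s.getD e 0] := by
      rw [List.take_succ]
      congr 1
      rw [List.getElem?_eq_getElem hlt]
      simp [List.getD, List.getElem?_eq_getElem hlt]
    rw [htake, List.foldl_append, ih (by omega)]
    cases e with
    | zero =>
      simp only [stB, List.foldl_cons, List.foldl_nil]
      norm_num [runLen_zero, maxRun_succ, maxRun_zero]
    | succ e' =>
      simp only [stB, List.foldl_cons, List.foldl_nil]
      have hrun : (if (some (s.getD e' 0) : Option Int) = some (s.getD (e' + 1) 0)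
          then runLen s e' + 1 else 1) = runLen s (e' + 1) := by
        rw [runLen_succ]
        by_cases h : s.getD (e' + 1) 0 = s.getD e' 0
        · rw [if_pos h, if_pos (by rw [h])]
        · rw [if_neg h, if_neg (by intro h'; exact h (Option.some.inj h').symm)]
      simp only [hrun, ← maxRun_succ]

-- ===== VERDICT (by name: the statement is the Claim_ definition above) =====
theorem solution_spec : Claim_equal_solution := by
  intro arr _
  unfold Spec_solution solution solution_alt
  simp only []
  set s := PySem.List.sorted arr (fun x => x) with hsdef
  have hlen : s.length = arr.length := PySem.List.length_sorted arr (fun x => x) false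
  have hs : ∀ p q : Nat, p ≤ q → q < s.length → s.getD p 0 ≤ s.getD q 0 := by
    intro p q hpq hq
    have := PySem.List.sorted_id_getElem_mono arr hpq hq
    rw [List.getD_eq_getElem s 0 (by omega), List.getD_eq_getElem s 0 hq]
    exact this
  rw [PySem.List.sorted_sorted arr (fun x => x)]
  have hA := loopA_eval s hs s.length 0 0 (by omega) (by omega)
  simp only [maxRun_zero, Nat.sub_zero] at hA
  rw [← hlen, hA]
  have hB := foldB_eval s s.length (le_refl _)
  rw [List.take_length] at hB
  rw [hB]
  have hmle : maxRun s s.length ≤ s.length := maxRun_le s s.length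
  cases hsl : s.length with
  | zero =>
    simp [stB, maxRun_zero]
  | succ m =>
    rw [hsl] at hmle
    simp only [stB]
    omega
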